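-- pv_equiv track=rewrite | github.com/ep-eaglepoint-ai/120-datasets | 3b61ea-Self_intersecting_polygon_area_from_relative_movements/repository_after/self_intersecting_polygon_area.py | steps_to_vertices
-- ===== SOURCE A (Python) =====
-- def steps_to_vertices(steps):
--     x, y = 0, 0
--     vertices = [(x, y)]
--
--     for step in steps:
--         if step == "UP":
--             y += 1
--         elif step == "DOWN":
--             y -= 1
--         elif step == "LEFT":
--             x -= 1
--         elif step == "RIGHT":
--             x += 1
--         else:
--             raise ValueError(f"Invalid direction: {step}")
--         vertices.append((x, y))
--
--     return vertices
-- ===== SOURCE B (Python) =====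
-- def steps_to_vertices(steps):
--     # Validate up front (first invalid step raises, same message as the original).
--     for step in steps:
--         if step not in ("UP", "DOWN", "LEFT", "RIGHT"):
--             raise ValueError(f"Invalid direction: {step}")
--     # Compute each coordinate axis independently by its own running sum
--     # (bool arithmetic: RIGHT/LEFT only move x, UP/DOWN only move y),
--     # then zip the two coordinate tracks into the vertex list.
--     xs = [0]
--     for step in steps:
--         xs.append(xs[-1] + (step == "RIGHT") - (step == "LEFT"))
--     ys = [0]
--     for step in steps:
--         ys.append(ys[-1] + (step == "UP") - (step == "DOWN"))
--     return list(zip(xs, ys))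
-- ===== Notes on version B (the rewrite author's own statement) =====
-- stated objective: alternative
-- what changed: B decomposes the problem by coordinate axis: a validation pass, then two independent running-sum passes computing the x-track and y-track from boolean arithmetic (no if/elif delta dispatch), zipped into vertices at the end, instead of A's single fused branch-update-append loop over a shared (x,y) state.
import Mathlib
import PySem

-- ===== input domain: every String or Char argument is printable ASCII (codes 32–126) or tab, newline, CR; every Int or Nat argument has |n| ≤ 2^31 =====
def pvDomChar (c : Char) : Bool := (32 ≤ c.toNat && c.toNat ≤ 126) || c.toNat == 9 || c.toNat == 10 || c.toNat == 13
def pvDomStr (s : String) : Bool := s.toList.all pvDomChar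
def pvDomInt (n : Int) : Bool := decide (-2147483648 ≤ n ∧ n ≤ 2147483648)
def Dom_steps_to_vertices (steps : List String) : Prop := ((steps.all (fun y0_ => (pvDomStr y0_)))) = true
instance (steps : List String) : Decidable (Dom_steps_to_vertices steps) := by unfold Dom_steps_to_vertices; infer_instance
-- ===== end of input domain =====

-- B computes the x-track and y-track as two independent running sums and zips them, instead of
-- A's fused branch-update-append loop; the RETURN value is proved equal on valid step lists.

-- ===== PORT A =====
-- A's loop: state (x, y, vertices), one pass, if/elif chain; on an invalid step Python raises
-- ValueError (excluded by Pre_; the port returns the vertices built so far there, unclaimed).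
def stepsToVerticesGoA : List String → Int → Int → List (Int × Int) → List (Int × Int)
  | [], _, _, vertices => vertices
  | step :: rest, x, y, vertices =>
    if step = "UP" then stepsToVerticesGoA rest x (y + 1) (vertices ++ [(x, y + 1)])
    else if step = "DOWN" then stepsToVerticesGoA rest x (y - 1) (vertices ++ [(x, y - 1)])
    else if step = "LEFT" then stepsToVerticesGoA rest (x - 1) y (vertices ++ [(x - 1, y)])
    else if step = "RIGHT" then stepsToVerticesGoA rest (x + 1) y (vertices ++ [(x + 1, y)])
    else vertices  -- raise ValueError: unreachable under Pre_

def steps_to_vertices (steps : List String) : List (Int × Int) :=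
  stepsToVerticesGoA steps 0 0 [(0, 0)]

-- ===== PORT B =====
-- Source B's validation pass (the raise is outside Pre_; the port signals it with false).
def altValid (steps : List String) : Bool :=
  steps.all (fun s => s = "UP" || s = "DOWN" || s = "LEFT" || s = "RIGHT")

-- Source B's x-track loop: xs.append(xs[-1] + (step == "RIGHT") - (step == "LEFT")).
def altXs : Int → List String → List Int
  | _, [] => []
  | x, s :: rest =>
    let x' := x + (if s = "RIGHT" then (1 : Int) else 0) - (if s = "LEFT" then 1 else 0)
    x' :: altXs x' rest

-- Source B's y-track loop: ys.append(ys[-1] + (step == "UP") - (step == "DOWN")).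
def altYs : Int → List String → List Int
  | _, [] => []
  | y, s :: rest =>
    let y' := y + (if s = "UP" then (1 : Int) else 0) - (if s = "DOWN" then 1 else 0)
    y' :: altYs y' rest

def steps_to_vertices_alt (steps : List String) : List (Int × Int) :=
  if altValid steps then ((0 : Int) :: altXs 0 steps).zip ((0 : Int) :: altYs 0 steps)
  else []  -- raise ValueError: unreachable under Pre_

-- ===== PRECONDITION & SPEC =====
-- Pre_ excludes exactly the inputs containing a step that is not one of the four directions,
-- on which the Python A raises ValueError (and B raises the same ValueError).
def Pre_steps_to_vertices (steps : List String) : Prop :=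
  ∀ s ∈ steps, s = "UP" ∨ s = "DOWN" ∨ s = "LEFT" ∨ s = "RIGHT"
instance (steps : List String) : Decidable (Pre_steps_to_vertices steps) := by
  unfold Pre_steps_to_vertices; infer_instance

def pvWitness_steps_to_vertices : List String := ["UP", "RIGHT", "DOWN", "DOWN", "LEFT"]

def Spec_steps_to_vertices (steps : List String) (out : List (Int × Int)) : Prop :=
  out = steps_to_vertices_alt steps
instance (steps : List String) (out : List (Int × Int)) : Decidable (Spec_steps_to_vertices steps out) := by
  unfold Spec_steps_to_vertices; infer_instance

-- ===== CLAIM (what is proved, stated in full; the proofs are below) =====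
def Claim_equal_steps_to_vertices : Prop := ∀ (steps : List String), Dom_steps_to_vertices steps → Pre_steps_to_vertices steps → Spec_steps_to_vertices steps (steps_to_vertices steps)

-- ===== LEMMAS AND PROOFS =====
theorem altValid_of_pre (steps : List String) (h : Pre_steps_to_vertices steps) :
    altValid steps = true := by
  unfold altValid
  rw [List.all_eq_true]
  intro s hs
  rcases h s hs with h' | h' | h' | h' <;> simp [h']

theorem stepsToVerticesGoA_eq (steps : List String) :
    ∀ (x y : Int) (vs : List (Int × Int)), Pre_steps_to_vertices steps →
      stepsToVerticesGoA steps x y vs = vs ++ (altXs x steps).zip (altYs y steps) := by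
  induction steps with
  | nil => intro x y vs _; simp [stepsToVerticesGoA, altXs, altYs]
  | cons s rest ih =>
    intro x y vs hpre
    have hs := hpre s (List.mem_cons_self ..)
    have hrest : Pre_steps_to_vertices rest := fun t ht => hpre t (List.mem_cons_of_mem _ ht)
    rcases hs with h | h | h | h <;> subst h <;>
      simp [stepsToVerticesGoA, altXs, altYs, sub_eq_add_neg, ih _ _ _ hrest]

-- ===== VERDICT (by name: the statement is the Claim_ definition above) =====
theorem steps_to_vertices_spec : Claim_equal_steps_to_vertices := by
  intro steps _ hpre
  unfold Spec_steps_to_vertices steps_to_vertices steps_to_vertices_alt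
  rw [altValid_of_pre steps hpre, if_pos rfl]
  simpa [List.zip] using stepsToVerticesGoA_eq steps 0 0 [(0, 0)] hpre
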